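-- pv_equiv track=rewrite | github.com/reidrac/mkc64tap | mkc64tap.py | encbytes
-- ===== SOURCE A (Python) =====
-- PULSE_S = 0x30
--
-- PULSE_M = 0x42
--
-- PULSE_L = 0x56
--
-- def encbit(bit):
--     """Encode a bit"""
--     return [PULSE_M, PULSE_S] if bit else [PULSE_S, PULSE_M]
--
-- def encbytes(data):
--     """Encode a list of bytes"""
--     encoded = []
--     for c in data:
--         check = 1
--         # data marker
--         encoded.extend([PULSE_L, PULSE_M])
--         for b in range(8):
--             bit = (c >> b) & 1
--             check ^= bit
--             encoded.extend(encbit(bit))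
--         encoded.extend(encbit(check))
--
--     return encoded
-- ===== SOURCE B (Python) =====
-- PULSE_S = 0x30
--
-- PULSE_M = 0x42
--
-- PULSE_L = 0x56
--
--
-- def _encbyte(v):
--     """Full pulse chunk for one byte value 0..255 (marker, 8 bits LSB-first, parity)."""
--     out = [PULSE_L, PULSE_M]
--     check = 1
--     for b in range(8):
--         bit = (v >> b) & 1
--         check ^= bit
--         out += [PULSE_M, PULSE_S] if bit else [PULSE_S, PULSE_M]
--     out += [PULSE_M, PULSE_S] if check else [PULSE_S, PULSE_M]
--     return out
--
--
-- _TABLE = [_encbyte(v) for v in range(256)]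
--
--
-- def encbytes(data):
--     """Encode a list of bytes"""
--     return [p for c in data for p in _TABLE[c % 256]]
-- ===== Notes on version B (the rewrite author's own statement) =====
-- stated objective: faster
-- what changed: B precomputes the 20-pulse chunk for each of the 256 byte values once in a table and emits the output as a single flat pass over the data (table[c % 256]), removing A's per-byte 8-iteration bit/parity loop.
import Mathlib
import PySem

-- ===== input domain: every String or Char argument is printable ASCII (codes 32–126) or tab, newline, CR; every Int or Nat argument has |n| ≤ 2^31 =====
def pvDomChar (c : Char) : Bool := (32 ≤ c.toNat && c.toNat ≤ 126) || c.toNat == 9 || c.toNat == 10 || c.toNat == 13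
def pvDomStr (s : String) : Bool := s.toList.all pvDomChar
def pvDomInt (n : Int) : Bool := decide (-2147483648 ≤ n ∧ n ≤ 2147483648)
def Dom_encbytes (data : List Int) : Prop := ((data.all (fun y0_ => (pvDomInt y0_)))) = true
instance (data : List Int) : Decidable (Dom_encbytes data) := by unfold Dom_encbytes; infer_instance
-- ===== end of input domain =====

-- B replaces A's per-byte inner bit loop by a 256-entry pulse table built once plus a
-- single flat pass over the data (objective: faster by a constant factor; same output).

-- ===== PORT A =====
def encbit (bit : Int) : List Int :=
  if bit ≠ 0 then [0x42, 0x30] else [0x30, 0x42]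

def encbytes (data : List Int) : List Int :=
  data.foldl (fun encoded c =>
    let st := (PySem.List.pyRange 0 8 1).foldl
      (fun (st : Int × List Int) b =>
        let bit := PySem.Int.band (c >>> b.toNat) 1
        (PySem.Int.bxor st.1 bit, st.2 ++ encbit bit))
      (1, encoded ++ [0x56, 0x42])
    st.2 ++ encbit st.1) []

-- ===== PORT B =====
def encByteChunk (v : Int) : List Int :=
  let st := (PySem.List.pyRange 0 8 1).foldl
    (fun (st : Int × List Int) b =>
      let bit := PySem.Int.band (v >>> b.toNat) 1
      (PySem.Int.bxor st.1 bit, st.2 ++ (if bit ≠ 0 then [0x42, 0x30] else [0x30, 0x42])))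
    (1, [0x56, 0x42])
  st.2 ++ (if st.1 ≠ 0 then [0x42, 0x30] else [0x30, 0x42])

def encTable : List (List Int) := (PySem.List.pyRange 0 256 1).map encByteChunk

def encbytes_alt (data : List Int) : List Int :=
  data.flatMap (fun c => PySem.List.pyGetD encTable (PySem.Int.mod c 256) [])

-- ===== PRECONDITION & SPEC =====
def Spec_encbytes (data : List Int) (out : List Int) : Prop := out = encbytes_alt data
instance (data : List Int) (out : List Int) : Decidable (Spec_encbytes data out) := by unfold Spec_encbytes; infer_instance

-- ===== CLAIM (what is proved, stated in full; the proofs are below) =====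
def Claim_equal_encbytes : Prop := ∀ (data : List Int), Dom_encbytes data → Spec_encbytes data (encbytes data)

-- ===== LEMMAS AND PROOFS =====

-- bit b of c equals bit b of c % 256, for b < 8
lemma bit_mod (c : Int) (b : Nat) (hb : b < 8) :
    PySem.Int.band ((c % 256) >>> b) 1 = PySem.Int.band (c >>> b) 1 := by
  rw [PySem.Int.band_one, PySem.Int.band_one, Int.shiftRight_eq_div_pow,
    Int.shiftRight_eq_div_pow]
  simp only [PySem.Int.mod, Int.fmod_eq_emod]
  norm_num
  interval_cases b <;> omega

lemma mod256_nonneg (c : Int) : 0 ≤ PySem.Int.mod c 256 := by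
  simp only [PySem.Int.mod, Int.fmod_eq_emod]
  have := Int.emod_nonneg c (by norm_num : (256:Int) ≠ 0)
  omega

lemma mod256_lt (c : Int) : PySem.Int.mod c 256 < 256 := by
  simp only [PySem.Int.mod, Int.fmod_eq_emod]
  have := Int.emod_lt_of_pos c (by norm_num : (0:Int) < 256)
  omega

lemma table_lookup (c : Int) :
    PySem.List.pyGetD encTable (PySem.Int.mod c 256) [] = encByteChunk (PySem.Int.mod c 256) := by
  unfold encTable
  exact PySem.List.pyGetD_map_pyRange_of_nonneg encByteChunk 256 _ [] (mod256_nonneg c) (mod256_lt c)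

-- A's per-byte chunk, shifted to an empty accumulator, equals B's table entry for c % 256
lemma body_eq (c : Int) (encoded : List Int) :
    ((PySem.List.pyRange 0 8 1).foldl (fun (st : Int × List Int) b =>
        (PySem.Int.bxor st.1 (PySem.Int.band (@HShiftRight.hShiftRight Int Nat Int Int.instHShiftRightNat c b.toNat) 1),
         st.2 ++ encbit (PySem.Int.band (@HShiftRight.hShiftRight Int Nat Int Int.instHShiftRightNat c b.toNat) 1)))
       (1, encoded ++ [0x56, 0x42])).2
      ++ encbit ((PySem.List.pyRange 0 8 1).foldl (fun (st : Int × List Int) b =>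
        (PySem.Int.bxor st.1 (PySem.Int.band (@HShiftRight.hShiftRight Int Nat Int Int.instHShiftRightNat c b.toNat) 1),
         st.2 ++ encbit (PySem.Int.band (@HShiftRight.hShiftRight Int Nat Int Int.instHShiftRightNat c b.toNat) 1)))
       (1, encoded ++ [0x56, 0x42])).1
    = encoded ++ PySem.List.pyGetD encTable (PySem.Int.mod c 256) [] := by
  rw [table_lookup]
  have hr : PySem.List.pyRange 0 8 1 = [0, 1, 2, 3, 4, 5, 6, 7] := by decide
  have h0 := bit_mod c 0 (by norm_num)
  have h1 := bit_mod c 1 (by norm_num)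
  have h2 := bit_mod c 2 (by norm_num)
  have h3 := bit_mod c 3 (by norm_num)
  have h4 := bit_mod c 4 (by norm_num)
  have h5 := bit_mod c 5 (by norm_num)
  have h6 := bit_mod c 6 (by norm_num)
  have h7 := bit_mod c 7 (by norm_num)
  have hm : PySem.Int.mod c 256 = c % 256 := by
    simp [PySem.Int.mod, Int.fmod_eq_emod]
  have t2 : (2 : Int).toNat = 2 := rfl
  have t3 : (3 : Int).toNat = 3 := rfl
  have t4 : (4 : Int).toNat = 4 := rfl
  have t5 : (5 : Int).toNat = 5 := rfl
  have t6 : (6 : Int).toNat = 6 := rfl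
  have t7 : (7 : Int).toNat = 7 := rfl
  simp only [encByteChunk, encbit, hr, hm, List.foldl, Int.toNat_zero, Int.toNat_one,
    t2, t3, t4, t5, t6, t7, Int.shiftRight_natCast_right]
  simp only [h0, h1, h2, h3, h4, h5, h6, h7]
  simp [List.append_assoc]

lemma encbytes_foldl (data : List Int) (acc : List Int) :
    data.foldl (fun encoded c =>
      let st := (PySem.List.pyRange 0 8 1).foldl
        (fun (st : Int × List Int) b =>
          let bit := PySem.Int.band (c >>> b.toNat) 1
          (PySem.Int.bxor st.1 bit, st.2 ++ encbit bit))
        (1, encoded ++ [0x56, 0x42])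
      st.2 ++ encbit st.1) acc
    = acc ++ data.flatMap (fun c => PySem.List.pyGetD encTable (PySem.Int.mod c 256) []) := by
  induction data generalizing acc with
  | nil => simp
  | cons c rest ih =>
    simp only [List.foldl, List.flatMap_cons]
    rw [ih, body_eq c acc, List.append_assoc]

-- ===== VERDICT (by name: the statement is the Claim_ definition above) =====
theorem encbytes_spec : Claim_equal_encbytes := by
  intro data _
  unfold Spec_encbytes encbytes encbytes_alt
  exact encbytes_foldl data []
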